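-- pv_equiv track=rewrite | github.com/ThusStyles/finalyearproject | letterExtractor.py | get_prime_array
-- ===== SOURCE A (Python) =====
-- import itertools
--
-- def get_prime_array(all_primes, prime_first, prime_last, top_first_val, left_first_val):
--
--     current_column_number = top_first_val
--     current_column = [current_column_number]
--     new_primes = []
--
--     # Get primes in a better format, list of lists, where each list is a column
--     for idx, prime in enumerate(all_primes[prime_first:prime_last]):
--         current_column.append(prime)
--         if (idx + 1) % 100 == 0:
--             new_primes.append(current_column)
--             current_column_number += 1
--             current_column = [current_column_number]
--         elif idx == (len(all_primes[prime_first:prime_last]) - 1):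
--             new_primes.append(current_column)
--             current_column_number += 1
--             current_column = [current_column_number]
--
--     # Transpose to make it in the correct format, so we can go line by line in the txt
--     new_primes = [list(x) for x in (itertools.zip_longest(*new_primes))]
--     transposed_primes = []
--
--     # Write the primes to the file
--     current_row_number = " "
--     for prime_list in new_primes:
--         if current_row_number == " ":
--             current_row_number = left_first_val
--         else:
--             prime_list = [current_row_number] + prime_list
--             current_row_number += 1
--         prime_list = [x for x in prime_list if x is not None]
--         transposed_primes.append(prime_list)
--
--     return transposed_primes
-- ===== SOURCE B (Python) =====
-- def get_prime_array(all_primes, prime_first, prime_last, top_first_val, left_first_val):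
--     primes = all_primes[prime_first:prime_last]
--     n = len(primes)
--     if n == 0:
--         return []
--     ncols = (n + 99) // 100
--     rows = min(n, 100)
--     out = [[top_first_val + c for c in range(ncols)]]
--     for r in range(rows):
--         row = [left_first_val + r]
--         for c in range(ncols):
--             i = c * 100 + r
--             if i < n:
--                 row.append(primes[i])
--         out.append(row)
--     return out
-- ===== Notes on version B (the rewrite author's own statement) =====
-- stated objective: simpler
-- what changed: B slices once and emits the header and each labelled row by direct indexing (primes[c*100+r]), never building column lists, a zip_longest transpose, or None padding that is later filtered out.
import Mathlib
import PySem

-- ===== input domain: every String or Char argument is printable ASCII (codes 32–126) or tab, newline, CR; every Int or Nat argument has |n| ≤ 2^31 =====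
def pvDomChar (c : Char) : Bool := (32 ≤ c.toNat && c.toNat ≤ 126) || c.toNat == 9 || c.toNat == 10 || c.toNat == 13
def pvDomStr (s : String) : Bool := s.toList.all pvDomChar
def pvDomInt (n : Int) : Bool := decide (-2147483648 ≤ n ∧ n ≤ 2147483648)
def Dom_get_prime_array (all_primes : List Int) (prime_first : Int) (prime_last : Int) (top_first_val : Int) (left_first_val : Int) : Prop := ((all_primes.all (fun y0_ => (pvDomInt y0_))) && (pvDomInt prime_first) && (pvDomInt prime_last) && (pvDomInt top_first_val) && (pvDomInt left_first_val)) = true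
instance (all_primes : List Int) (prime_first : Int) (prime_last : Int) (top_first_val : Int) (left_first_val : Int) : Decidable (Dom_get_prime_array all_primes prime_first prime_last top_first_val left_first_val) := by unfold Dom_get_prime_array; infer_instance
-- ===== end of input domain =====

-- B replaces A's column-building / zip_longest transpose / None-filter pipeline by direct indexing
-- into the slice (objective: simpler; return values proved identical on the whole domain).

-- ===== PORT A =====
-- loop body of A's first for-loop; state = (current_column_number, current_column, new_primes)
def gpaStep (n : Int) (st : Int × List Int × List (List Int)) (p : Int × Int) :
    Int × List Int × List (List Int) :=
  let cc := st.2.1 ++ [p.2]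
  if PySem.Int.mod (p.1 + 1) 100 == 0 then
    (st.1 + 1, [st.1 + 1], st.2.2 ++ [cc])
  else if p.1 == n - 1 then
    (st.1 + 1, [st.1 + 1], st.2.2 ++ [cc])
  else (st.1, cc, st.2.2)

def pyMaxLen (cols : List (List Int)) : Nat := cols.foldl (fun m c => max m c.length) 0

-- hand port of itertools.zip_longest(*cols) (+ list(x) per row): exact — zip_longest with at
-- least one iterable yields max-length rows, row r holding cols[c][r] or None for each column.
def pyZipLongest (cols : List (List Int)) : List (List (Option Int)) :=
  match cols with
  | [] => []
  | _ :: _ => (List.range (pyMaxLen cols)).map (fun r => cols.map (fun col => col[r]?))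

-- loop body of A's second for-loop; state = (current_row_number as Option (" " = none), transposed_primes)
def gpaLabelStep (lv : Int) (st : Option Int × List (List Int)) (pl : List (Option Int)) :
    Option Int × List (List Int) :=
  match st.1 with
  | none => (some lv, st.2 ++ [pl.filterMap id])
  | some k => (some (k + 1), st.2 ++ [((some k) :: pl).filterMap id])

def get_prime_array (all_primes : List Int) (prime_first : Int) (prime_last : Int) (top_first_val : Int) (left_first_val : Int) : List (List Int) :=
  let sliced := PySem.List.slice all_primes (some prime_first) (some prime_last)
  let st := (PySem.List.enumerate sliced 0).foldl (gpaStep (sliced.length : Int))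
      (top_first_val, [top_first_val], [])
  let new_primes := st.2.2
  let transposed := pyZipLongest new_primes
  (transposed.foldl (gpaLabelStep left_first_val) (none, [])).2

-- ===== PORT B =====
def get_prime_array_alt (all_primes : List Int) (prime_first : Int) (prime_last : Int) (top_first_val : Int) (left_first_val : Int) : List (List Int) :=
  let primes := PySem.List.slice all_primes (some prime_first) (some prime_last)
  let n := primes.length
  if n = 0 then []
  else
    let ncols := (n + 99) / 100
    let rows := min n 100
    ((List.range ncols).map (fun (c : Nat) => top_first_val + (c : Int))) ::
      (List.range rows).map (fun (r : Nat) =>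
        (left_first_val + (r : Int)) ::
          (List.range ncols).filterMap (fun (c : Nat) =>
            if c * 100 + r < n then primes[c * 100 + r]? else none))

-- ===== PRECONDITION & SPEC =====
def Spec_get_prime_array (all_primes : List Int) (prime_first : Int) (prime_last : Int) (top_first_val : Int) (left_first_val : Int) (out : List (List Int)) : Prop := out = get_prime_array_alt all_primes prime_first prime_last top_first_val left_first_val
instance (all_primes : List Int) (prime_first : Int) (prime_last : Int) (top_first_val : Int) (left_first_val : Int) (out : List (List Int)) : Decidable (Spec_get_prime_array all_primes prime_first prime_last top_first_val left_first_val out) := by unfold Spec_get_prime_array; infer_instance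

-- ===== CLAIM (what is proved, stated in full; the proofs are below) =====
def Claim_equal_get_prime_array : Prop := ∀ (all_primes : List Int) (prime_first : Int) (prime_last : Int) (top_first_val : Int) (left_first_val : Int), Dom_get_prime_array all_primes prime_first prime_last top_first_val left_first_val → Spec_get_prime_array all_primes prime_first prime_last top_first_val left_first_val (get_prime_array all_primes prime_first prime_last top_first_val left_first_val)

-- ===== LEMMAS AND PROOFS =====

-- pure recursion computing the columns A's first loop accumulates
def colsGo (ccn : Int) (cur : List Int) (r : Nat) (ps : List Int) : List (List Int) :=
  match ps with
  | [] => []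
  | p :: tl =>
    if r + 1 = 100 ∨ tl = [] then (cur ++ [p]) :: colsGo (ccn + 1) [ccn + 1] 0 tl
    else colsGo ccn (cur ++ [p]) (r + 1) tl

-- closed form of the columns: column c = label (t+c) :: chunk c of ps
def colsSpec (t : Int) (ps : List Int) : List (List Int) :=
  (List.range ((ps.length + 99) / 100)).map (fun (c : Nat) => (t + (c : Int)) :: (ps.drop (100 * c)).take 100)

-- pure recursion computing A's second loop once the state is (some k, acc)
def labelGo (k : Int) (rs : List (List (Option Int))) : List (List Int) :=
  match rs with
  | [] => []
  | x :: xs => ((some k :: x).filterMap id) :: labelGo (k + 1) xs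

theorem gpa_fold_inv (ps : List Int) (j : Nat) (n : Int) (ccn : Int) (cur : List Int)
    (acc : List (List Int)) (hn : n = (j : Int) + ps.length) :
    ((PySem.List.enumerate ps (j : Int)).foldl (gpaStep n) (ccn, cur, acc)).2.2
      = acc ++ colsGo ccn cur (j % 100) ps := by
  induction ps generalizing j ccn cur acc with
  | nil => simp [PySem.List.enumerate_nil, colsGo]
  | cons p tl ih =>
    rw [PySem.List.enumerate_cons, List.foldl_cons]
    have hc1 : ((j : Int) + 1) = ((j + 1 : Nat) : Int) := by push_cast; ring
    have hn' : n = ((j + 1 : Nat) : Int) + tl.length := by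
      simp only [List.length_cons] at hn; push_cast at hn ⊢; omega
    have hm : PySem.Int.mod ((j + 1 : Nat) : Int) 100 = (((j + 1) % 100 : Nat) : Int) := by
      exact_mod_cast PySem.Int.mod_natCast (j + 1) 100
    by_cases h1 : (j + 1) % 100 = 0
    · have hcond1 : (PySem.Int.mod ((j : Int) + 1) 100 == 0) = true := by
        rw [hc1, hm, h1]; decide
      have hstep : gpaStep n (ccn, cur, acc) ((j : Int), p)
          = (ccn + 1, [ccn + 1], acc ++ [cur ++ [p]]) := by
        simp only [gpaStep]
        rw [hcond1]
        simp
      rw [hstep, hc1, ih (j + 1) (ccn + 1) [ccn + 1] (acc ++ [cur ++ [p]]) hn', h1]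
      have hj : j % 100 + 1 = 100 := by omega
      simp [colsGo, hj]
    · by_cases htl : tl = []
      · subst htl
        have hj : (j : Int) = n - 1 := by
          simp only [List.length_cons, List.length_nil] at hn; push_cast at hn; omega
        have hcond1 : (PySem.Int.mod ((j : Int) + 1) 100 == 0) = false := by
          rw [hc1, hm, beq_eq_false_iff_ne]; exact_mod_cast h1
        have hstep : gpaStep n (ccn, cur, acc) ((j : Int), p)
            = (ccn + 1, [ccn + 1], acc ++ [cur ++ [p]]) := by
          simp only [gpaStep]
          rw [hcond1]
          simp [hj]
        rw [hstep]
        simp [PySem.List.enumerate_nil, colsGo]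
      · have hj : (j : Int) ≠ n - 1 := by
          have h0 : tl.length ≠ 0 := by simpa using htl
          simp only [List.length_cons] at hn; push_cast at hn; omega
        have hcond1 : (PySem.Int.mod ((j : Int) + 1) 100 == 0) = false := by
          rw [hc1, hm, beq_eq_false_iff_ne]; exact_mod_cast h1
        have hstep : gpaStep n (ccn, cur, acc) ((j : Int), p)
            = (ccn, cur ++ [p], acc) := by
          simp only [gpaStep]
          rw [hcond1]
          simp [hj]
        rw [hstep, hc1, ih (j + 1) ccn (cur ++ [p]) acc hn']
        have hj100 : (j + 1) % 100 = j % 100 + 1 := by omega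
        have hne : ¬(j % 100 + 1 = 100 ∨ tl = []) := by
          push Not; exact ⟨by omega, htl⟩
        rw [hj100]
        conv_rhs => rw [colsGo]
        rw [if_neg hne]

theorem colsGo_column (ps : List Int) (ccn : Int) (cur : List Int) (r : Nat)
    (hr : r < 100) (hps : ps ≠ []) :
    colsGo ccn cur r ps
      = (cur ++ ps.take (100 - r)) :: colsGo (ccn + 1) [ccn + 1] 0 (ps.drop (100 - r)) := by
  induction ps generalizing ccn cur r with
  | nil => exact absurd rfl hps
  | cons p tl ih =>
    have h1 : 100 - r = (99 - r) + 1 := by omega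
    by_cases hc : r + 1 = 100 ∨ tl = []
    · conv_lhs => rw [colsGo]
      rw [if_pos hc]
      rcases hc with hc | hc
      · have h2 : 100 - r = 1 := by omega
        simp [h2]
      · subst hc
        rw [h1, List.take_succ_cons, List.drop_succ_cons]
        simp [colsGo]
    · conv_lhs => rw [colsGo]
      rw [if_neg hc]
      push Not at hc
      rw [ih ccn (cur ++ [p]) (r + 1) (by omega) hc.2]
      have h2 : 100 - (r + 1) = 99 - r := by omega
      rw [h2, h1, List.take_succ_cons, List.drop_succ_cons]
      simp

theorem colsGo_spec_aux (N : Nat) : ∀ (ps : List Int), ps.length ≤ N → ∀ (t : Int),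
    colsGo t [t] 0 ps = colsSpec t ps := by
  induction N with
  | zero =>
    intro ps hlen t
    have : ps = [] := List.eq_nil_of_length_eq_zero (by omega)
    subst this
    simp [colsGo, colsSpec]
  | succ N ih =>
    intro ps hlen t
    by_cases hps : ps = []
    · subst hps; simp [colsGo, colsSpec]
    · have hn0 : 0 < ps.length := List.length_pos_iff.mpr hps
      rw [colsGo_column ps t [t] 0 (by omega) hps]
      simp only [Nat.sub_zero]
      rw [ih (ps.drop 100) (by rw [List.length_drop]; omega) (t + 1)]
      unfold colsSpec
      have hnc : (ps.length + 99) / 100 = ((ps.drop 100).length + 99) / 100 + 1 := by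
        rw [List.length_drop]; omega
      rw [hnc, List.range_succ_eq_map]
      simp only [List.map_cons, List.map_map]
      congr 1
      · simp
      · apply List.map_congr_left
        intro c _
        simp only [Function.comp]
        have hd : (ps.drop 100).drop (100 * c) = ps.drop (100 * Nat.succ c) := by
          rw [List.drop_drop]; congr 1; omega
        rw [hd]
        congr 1
        push_cast [Nat.succ_eq_add_one]
        ring

theorem colsGo_spec (ps : List Int) (t : Int) : colsGo t [t] 0 ps = colsSpec t ps :=
  colsGo_spec_aux ps.length ps le_rfl t

theorem label_fold (rs : List (List (Option Int))) (lv k : Int) (acc : List (List Int)) :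
    (rs.foldl (gpaLabelStep lv) (some k, acc)).2 = acc ++ labelGo k rs := by
  induction rs generalizing k acc with
  | nil => simp [labelGo]
  | cons x xs ih =>
    rw [List.foldl_cons]
    have hstep : gpaLabelStep lv (some k, acc) x
        = (some (k + 1), acc ++ [((some k) :: x).filterMap id]) := rfl
    rw [hstep, ih]
    simp [labelGo]

theorem labelGo_range (m : Nat) (f : Nat → List (Option Int)) (k : Int) :
    labelGo k ((List.range m).map f)
      = (List.range m).map (fun (r : Nat) => (k + (r : Int)) :: (f r).filterMap id) := by
  induction m generalizing f k with
  | zero => simp [labelGo]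
  | succ m ih =>
    rw [List.range_succ_eq_map, List.map_cons, List.map_map, List.map_cons, List.map_map]
    rw [labelGo]
    congr 1
    · simp
    · simp only [Function.comp_def, Nat.succ_eq_add_one]
      rw [ih (fun r => f (r + 1)) (k + 1)]
      apply List.map_congr_left
      intro r _
      congr 1
      push_cast
      ring

theorem maxLen_colsSpec (t : Int) (ps : List Int) (hps : ps ≠ []) :
    pyMaxLen (colsSpec t ps) = (min 100 ps.length) + 1 := by
  have hn0 : 0 < ps.length := List.length_pos_iff.mpr hps
  have hlen : ∀ x ∈ colsSpec t ps, x.length ≤ min 100 ps.length + 1 := by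
    intro x hx
    simp only [colsSpec, List.mem_map, List.mem_range] at hx
    obtain ⟨c, _, rfl⟩ := hx
    simp only [List.length_cons, List.length_take, List.length_drop]
    omega
  have hmem : (t :: ps.take 100) ∈ colsSpec t ps := by
    simp only [colsSpec, List.mem_map, List.mem_range]
    exact ⟨0, by omega, by simp⟩
  have hup : ∀ (l : List (List Int)) (a : Nat), a ≤ min 100 ps.length + 1 →
      (∀ x ∈ l, x.length ≤ min 100 ps.length + 1) →
      l.foldl (fun m c => max m c.length) a ≤ min 100 ps.length + 1 := by
    intro l
    induction l with
    | nil => intro a ha _; simpa using ha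
    | cons x xs ihl =>
      intro a ha h
      rw [List.foldl_cons]
      exact ihl (max a x.length) (by
        have := h x (by simp); omega) (fun y hy => h y (by simp [hy]))
  apply Nat.le_antisymm
  · exact hup _ 0 (by omega) hlen
  · have := (PySem.List.le_foldl_max ((colsSpec t ps).map List.length) 0).2
      (t :: ps.take 100).length (List.mem_map_of_mem hmem)
    rw [pyMaxLen, ← List.foldl_map]
    simp only [List.length_cons, List.length_take] at this
    exact this

theorem pyZipLongest_cons (x : List Int) (xs : List (List Int)) :
    pyZipLongest (x :: xs)
      = (List.range (pyMaxLen (x :: xs))).map (fun r => (x :: xs).map (fun col => col[r]?)) := rfl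

theorem core_eq (ps : List Int) (tv lv : Int) :
    ((pyZipLongest (((PySem.List.enumerate ps (0 : Int)).foldl (gpaStep (ps.length : Int))
          (tv, [tv], [])).2.2)).foldl (gpaLabelStep lv) (none, [])).2
      = if ps.length = 0 then []
        else ((List.range ((ps.length + 99) / 100)).map (fun (c : Nat) => tv + (c : Int))) ::
          (List.range (min ps.length 100)).map (fun (r : Nat) =>
            (lv + (r : Int)) :: (List.range ((ps.length + 99) / 100)).filterMap (fun (c : Nat) =>
              if c * 100 + r < ps.length then ps[c * 100 + r]? else none)) := by
  have hfold := gpa_fold_inv ps 0 (ps.length : Int) tv [tv] [] (by simp)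
  simp only [Nat.cast_zero, Nat.zero_mod, List.nil_append] at hfold
  rw [hfold, colsGo_spec]
  by_cases hps : ps = []
  · subst hps
    simp [colsSpec, pyZipLongest]
  · have hn0 : 0 < ps.length := List.length_pos_iff.mpr hps
    rw [if_neg (by omega)]
    have hcne : colsSpec tv ps ≠ [] := by
      simp only [colsSpec, ne_eq, List.map_eq_nil_iff, List.range_eq_nil]
      omega
    obtain ⟨c0, cs, hc⟩ := List.exists_cons_of_ne_nil hcne
    have hzip : pyZipLongest (colsSpec tv ps)
        = (List.range (pyMaxLen (colsSpec tv ps))).map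
            (fun r => (colsSpec tv ps).map (fun col => col[r]?)) := by
      rw [hc, pyZipLongest_cons, ← hc]
    rw [hzip, maxLen_colsSpec tv ps hps]
    rw [List.range_succ_eq_map, List.map_cons, List.map_map, List.foldl_cons]
    have hstep0 : gpaLabelStep lv ((none : Option Int), ([] : List (List Int)))
        ((colsSpec tv ps).map (fun col => col[0]?))
        = (some lv, [((colsSpec tv ps).map (fun col => col[0]?)).filterMap id]) := rfl
    rw [hstep0, label_fold, List.singleton_append]
    congr 1
    · simp [colsSpec, List.filterMap_map]
    · simp only [Function.comp_def, Nat.succ_eq_add_one]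
      rw [labelGo_range]
      rw [show min 100 ps.length = min ps.length 100 from Nat.min_comm 100 ps.length]
      apply List.map_congr_left
      intro r hr
      rw [List.mem_range] at hr
      congr 1
      simp only [colsSpec, List.map_map, Function.comp_def, List.getElem?_cons_succ]
      rw [List.filterMap_map]
      apply List.filterMap_congr
      intro c _
      simp only [Function.comp_def, id]
      rw [List.getElem?_take, if_pos (by omega), List.getElem?_drop]
      by_cases h : c * 100 + r < ps.length
      · rw [if_pos h]
        congr 1
        ring
      · rw [if_neg h]
        exact List.getElem?_eq_none_iff.mpr (by omega)

-- ===== VERDICT (by name: the statement is the Claim_ definition above) =====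
theorem get_prime_array_spec : Claim_equal_get_prime_array := by
  intro all_primes prime_first prime_last top_first_val left_first_val _
  unfold Spec_get_prime_array
  simp only [get_prime_array, get_prime_array_alt]
  exact core_eq (PySem.List.slice all_primes (some prime_first) (some prime_last))
    top_first_val left_first_val
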